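-- pv_equiv track=rewrite | github.com/eden-fenster/projects_2022 | practice/how_many_sorted.py | how_many_sorted
-- ===== SOURCE A (Python) =====
-- def how_many_sorted(length: int, max_num: int, location: int, current_num: int) -> int:
--     # If length == max, return # of options.
--     if length == max_num:
--         return (length * max_num) - 1
--     # If at end, return.
--     if location == length:
--         return 0
--     if current_num > max_num:
--         return 0
--     # Moving down the search path.
--     if location == 0:
--         return 1 + how_many_sorted(length=length, max_num=max_num,
--                                    location=location + 1, current_num=current_num + 1) + \
--                how_many_sorted(length=length, max_num=max_num,
--                                location=location, current_num=current_num + 1)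
--     return 1 + how_many_sorted(length=length, max_num=max_num,
--                                location=location + 1, current_num=current_num + 1) + \
--            how_many_sorted(length=length, max_num=max_num,
--                            location=location + 1, current_num=current_num) + \
--            how_many_sorted(length=length, max_num=max_num,
--                            location=location, current_num=current_num + 1)
-- ===== SOURCE B (Python) =====
-- def how_many_sorted(length: int, max_num: int, location: int, current_num: int) -> int:
--     # Bottom-up DP over (loc, current value) replacing A's exponential recursion.
--     if length == max_num:
--         return length * max_num - 1
--     if location == length or current_num > max_num:
--         return 0
--     width = max_num - current_num + 1
--     row = [0] * (width + 1)          # row for loc == length; last cell is value max_num+1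
--     loc = length
--     while loc > location:
--         loc -= 1
--         new = [0] * (width + 1)
--         for i in range(width - 1, -1, -1):
--             if loc == 0:
--                 new[i] = 1 + row[i + 1] + new[i + 1]
--             else:
--                 new[i] = 1 + row[i + 1] + row[i] + new[i + 1]
--         row = new
--     return row[0]
-- ===== Notes on version B (the rewrite author's own statement) =====
-- stated objective: alternative
-- what changed: Replaced A's 3-way tree recursion with a bottom-up dynamic-programming table filled row by row over (location, current value), so each state is computed once instead of exponentially many times.
-- outside the precondition, e.g. on how_many_sorted(-2, 5, 0, 5): A returns 1, B returns 0
import Mathlib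
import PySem

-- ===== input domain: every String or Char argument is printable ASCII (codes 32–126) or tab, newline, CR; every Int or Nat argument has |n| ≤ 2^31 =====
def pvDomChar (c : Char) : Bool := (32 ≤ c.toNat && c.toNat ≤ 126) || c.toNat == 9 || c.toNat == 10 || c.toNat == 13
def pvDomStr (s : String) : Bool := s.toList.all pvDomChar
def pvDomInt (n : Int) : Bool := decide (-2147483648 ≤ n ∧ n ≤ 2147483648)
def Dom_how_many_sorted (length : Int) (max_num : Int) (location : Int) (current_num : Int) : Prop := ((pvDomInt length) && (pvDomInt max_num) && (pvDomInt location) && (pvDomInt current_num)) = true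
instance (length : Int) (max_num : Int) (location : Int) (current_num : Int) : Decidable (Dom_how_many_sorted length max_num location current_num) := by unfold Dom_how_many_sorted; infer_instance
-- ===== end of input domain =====

-- B replaces A's 3-way tree recursion with a bottom-up DP table over (location, current
-- value); equivalence is proved on Pre_ (where A's recursion terminates).


-- ===== PORT A =====
-- A's recursion, step for step; the fuel only makes it total in Lean (inside Pre_ the
-- supplied fuel is sufficient, see the lemmas below).
def howAfuel (length : Int) (max_num : Int) : Nat → Int → Int → Int
  | 0, _, _ => 0
  | fuel+1, location, current_num =>
    if length = max_num then length * max_num - 1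
    else if location = length then 0
    else if current_num > max_num then 0
    else if location = 0 then
      1 + howAfuel length max_num fuel (location + 1) (current_num + 1)
        + howAfuel length max_num fuel location (current_num + 1)
    else
      1 + howAfuel length max_num fuel (location + 1) (current_num + 1)
        + howAfuel length max_num fuel (location + 1) current_num
        + howAfuel length max_num fuel location (current_num + 1)

def how_many_sorted (length : Int) (max_num : Int) (location : Int) (current_num : Int) : Int :=
  howAfuel length max_num
    ((length - location).natAbs + (max_num + 1 - current_num).natAbs + 1) location current_num

-- ===== PORT B =====
-- inner loop of Source B: builds the new row back to front; element i of the result is the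
-- value for current number cn0+i at the current location; addSelf says location ≠ 0.
def buildRow (addSelf : Bool) : List Int → List Int
  | [] => []
  | [_] => [0]
  | x :: y :: rest =>
    let tail := buildRow addSelf (y :: rest)
    (1 + y + (if addSelf then x else 0) + tail.headD 0) :: tail

-- outer while loop of Source B: n rows remain; the incoming row is for loc = location + n.
def loopB (location : Int) : Nat → List Int → List Int
  | 0, row => row
  | n+1, row => loopB location n (buildRow (decide (location + (n : Int) ≠ 0)) row)

def how_many_sorted_alt (length : Int) (max_num : Int) (location : Int) (current_num : Int) : Int :=
  if length = max_num then length * max_num - 1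
  else if location = length ∨ current_num > max_num then 0
  else
    let width := (max_num - current_num + 1).toNat
    let init := List.replicate (width + 1) 0
    (loopB location (length - location).toNat init).getD 0 0

-- ===== PRECONDITION & SPEC =====
-- Pre_ excludes the inputs with location > length on which no base case fires at once:
-- there A's recursion almost always never reaches a base case (Python A raises
-- RecursionError), and on the one stray terminating corner (location = 0 > length,
-- current_num = max_num) A's value 1 is an artefact of the location = 0 branch being
-- re-entered outside the array; B treats the empty location range as empty and returns 0.
def Pre_how_many_sorted (length : Int) (max_num : Int) (location : Int) (current_num : Int) : Prop :=
  length = max_num ∨ location ≤ length ∨ current_num > max_num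
instance (length : Int) (max_num : Int) (location : Int) (current_num : Int) : Decidable (Pre_how_many_sorted length max_num location current_num) := by unfold Pre_how_many_sorted; infer_instance

def pvWitness_how_many_sorted : Int × Int × Int × Int := (3, 2, 0, 1)

def Spec_how_many_sorted (length : Int) (max_num : Int) (location : Int) (current_num : Int) (out : Int) : Prop := out = how_many_sorted_alt length max_num location current_num
instance (length : Int) (max_num : Int) (location : Int) (current_num : Int) (out : Int) : Decidable (Spec_how_many_sorted length max_num location current_num out) := by unfold Spec_how_many_sorted; infer_instance

-- ===== CLAIM (what is proved, stated in full; the proofs are below) =====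
def Claim_equal_how_many_sorted : Prop := ∀ (length : Int) (max_num : Int) (location : Int) (current_num : Int), Dom_how_many_sorted length max_num location current_num → Pre_how_many_sorted length max_num location current_num → Spec_how_many_sorted length max_num location current_num (how_many_sorted length max_num location current_num)

-- ===== LEMMAS AND PROOFS =====

-- recursion measure of A
def muA (length : Int) (max_num : Int) (loc : Int) (cn : Int) : Nat :=
  (length - loc).toNat + (max_num + 1 - cn).toNat

theorem headD_eq_getD (l : List Int) (h : 0 < l.length) : l.headD 0 = l.getD 0 0 := by
  cases l with
  | nil => simp at h
  | cons a t => rfl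

-- buildRow turns a correct row for loc+1 into a correct row for loc.
theorem buildRow_spec (L M : Int) (hLM : L ≠ M) (loc : Int) (hloc : loc < L)
    (r : List Int) : ∀ (cn0 : Int), 1 ≤ r.length →
    cn0 + ((r.length - 1 : Nat) : Int) = M + 1 →
    (∀ j : Nat, j < r.length → ∀ fuel : Nat, muA L M (loc + 1) (cn0 + (j : Int)) < fuel →
        r.getD j 0 = howAfuel L M fuel (loc + 1) (cn0 + (j : Int))) →
    (buildRow (decide (loc ≠ 0)) r).length = r.length ∧
    (∀ j : Nat, j < r.length → ∀ fuel : Nat, muA L M loc (cn0 + (j : Int)) < fuel →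
        (buildRow (decide (loc ≠ 0)) r).getD j 0 = howAfuel L M fuel loc (cn0 + (j : Int))) := by
  induction r with
  | nil => intro cn0 h1; simp at h1
  | cons x xs ih =>
    intro cn0 _ hlast hr
    cases xs with
    | nil =>
      -- r = [x] : the single cell is past max_num (cn0 = M+1)
      have hcn : cn0 = M + 1 := by simpa using hlast
      refine ⟨rfl, ?_⟩
      intro j hj fuel hfuel
      simp only [List.length_cons, List.length_nil] at hj
      obtain rfl : j = 0 := by omega
      simp only [Nat.cast_zero, add_zero] at hfuel ⊢
      obtain ⟨f, rfl⟩ : ∃ f, fuel = f + 1 := ⟨fuel - 1, by omega⟩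
      simp only [buildRow, howAfuel]
      rw [if_neg hLM, if_neg (by omega), if_pos (by omega)]
      rfl
    | cons y rest =>
      have hlen : (x :: y :: rest).length = rest.length + 2 := by simp
      have hcn0 : cn0 ≤ M := by
        have : cn0 + ((rest.length + 1 : Nat) : Int) = M + 1 := by
          simpa [hlen] using hlast
        push_cast at this; omega
      -- IH for the tail at cn0+1
      have ihtail := ih (cn0 + 1) (by simp)
        (by
          have h : cn0 + ((rest.length + 1 : Nat) : Int) = M + 1 := by
            simpa [hlen] using hlast
          simp only [List.length_cons]
          push_cast at h ⊢
          omega)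
        (by
          intro j hj fuel hfuel
          have heq : (cn0 + 1) + (j : Int) = cn0 + ((j + 1 : Nat) : Int) := by push_cast; ring
          rw [heq] at hfuel ⊢
          have h := hr (j + 1) (by simp at hj ⊢; omega) fuel hfuel
          simpa using h)
      obtain ⟨ihlen, ihspec⟩ := ihtail
      have htail_pos : 0 < (buildRow (decide (loc ≠ 0)) (y :: rest)).length := by
        rw [ihlen]; simp
      constructor
      · simp only [buildRow, List.length_cons, ihlen]
      · intro j hj fuel hfuel
        cases j with
        | succ j =>
          -- element j+1 of the new row is element j of the rebuilt tail
          have heq : cn0 + ((j + 1 : Nat) : Int) = (cn0 + 1) + (j : Int) := by push_cast; ring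
          rw [heq]
          have := ihspec j (by simp at hj ⊢; omega) fuel (by rw [heq] at hfuel; exact hfuel)
          simpa only [buildRow] using this
        | zero =>
          -- head: unfold one step of A's recursion
          simp only [Nat.cast_zero, add_zero] at hfuel ⊢
          have hmu : 2 ≤ muA L M loc cn0 := by simp only [muA]; omega
          obtain ⟨f, rfl⟩ : ∃ f, fuel = f + 1 := ⟨fuel - 1, by omega⟩
          have hf : muA L M loc cn0 ≤ f := by omega
          -- values of the three sub-calls
          have hy : y = howAfuel L M f (loc + 1) (cn0 + 1) := by
            have := hr 1 (by simp) f (by simp only [muA] at hf ⊢; push_cast; omega)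
            simpa using this
          have hx : x = howAfuel L M f (loc + 1) cn0 := by
            have := hr 0 (by simp) f (by simp only [muA] at hf ⊢; push_cast; omega)
            simpa using this
          have htail : (buildRow (decide (loc ≠ 0)) (y :: rest)).headD 0
              = howAfuel L M f loc (cn0 + 1) := by
            rw [headD_eq_getD _ htail_pos]
            have := ihspec 0 (by simp) f (by simp only [muA] at hf ⊢; push_cast; omega)
            simpa using this
          simp only [howAfuel]
          rw [if_neg hLM, if_neg (by omega), if_neg (by omega)]
          by_cases h0 : loc = 0
          · rw [if_pos h0]
            have hb : (decide (loc ≠ 0)) = false := by simp [h0]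
            simp only [buildRow, hb, List.getD_cons_zero, if_false, Bool.false_eq_true]
            rw [hb] at htail
            rw [← hy, ← htail]
            ring
          · rw [if_neg h0]
            have hb : (decide (loc ≠ 0)) = true := by simp [h0]
            simp only [buildRow, hb, List.getD_cons_zero, if_true]
            rw [hb] at htail
            rw [← hy, ← hx, ← htail]

-- the outer loop carries the row invariant from loc = location + n down to loc = location
theorem loopB_spec (L M : Int) (hLM : L ≠ M) (location : Int) (cn0 : Int) (w : Nat)
    (hw : cn0 + (w : Int) = M + 1) :
    ∀ (n : Nat) (row : List Int), location + (n : Int) ≤ L →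
    row.length = w + 1 →
    (∀ j : Nat, j ≤ w → ∀ fuel : Nat, muA L M (location + (n : Int)) (cn0 + (j : Int)) < fuel →
        row.getD j 0 = howAfuel L M fuel (location + (n : Int)) (cn0 + (j : Int))) →
    (loopB location n row).length = w + 1 ∧
    (∀ j : Nat, j ≤ w → ∀ fuel : Nat, muA L M location (cn0 + (j : Int)) < fuel →
        (loopB location n row).getD j 0 = howAfuel L M fuel location (cn0 + (j : Int))) := by
  intro n
  induction n with
  | zero =>
    intro row _ hlen hrow
    simp only [Nat.cast_zero, add_zero] at hrow
    exact ⟨by simpa [loopB] using hlen, by simpa [loopB] using hrow⟩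
  | succ n ih =>
    intro row hle hlen hrow
    have hloc : location + (n : Int) < L := by push_cast at hle; omega
    have hb := buildRow_spec L M hLM (location + (n : Int)) hloc row cn0
      (by omega)
      (by rw [hlen]; push_cast; omega)
      (by
        intro j hj fuel hfuel
        have heq : location + (n : Int) + 1 = location + ((n + 1 : Nat) : Int) := by
          push_cast; ring
        rw [heq] at hfuel ⊢
        exact hrow j (by omega) fuel hfuel)
    obtain ⟨hblen, hbspec⟩ := hb
    have := ih (buildRow (decide (location + (n : Int) ≠ 0)) row)
      (by push_cast at hle ⊢; omega)
      (by rw [hblen, hlen])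
      (by intro j hj fuel hfuel; exact hbspec j (by omega) fuel hfuel)
    simpa only [loopB] using this

-- ===== VERDICT (by name: the statement is the Claim_ definition above) =====
theorem how_many_sorted_spec : Claim_equal_how_many_sorted := by
  intro L M location cn _ hpre
  unfold Spec_how_many_sorted how_many_sorted how_many_sorted_alt
  by_cases hLM : L = M
  · obtain ⟨f, hf⟩ : ∃ f, (L - location).natAbs + (M + 1 - cn).natAbs + 1 = f + 1 :=
      ⟨(L - location).natAbs + (M + 1 - cn).natAbs, rfl⟩
    rw [hf]
    simp only [howAfuel]
    rw [if_pos hLM, if_pos hLM]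
  · rw [if_neg hLM]
    by_cases hbase : location = L ∨ cn > M
    · rw [if_pos hbase]
      obtain ⟨f, hf⟩ : ∃ f, (L - location).natAbs + (M + 1 - cn).natAbs + 1 = f + 1 :=
        ⟨(L - location).natAbs + (M + 1 - cn).natAbs, rfl⟩
      rw [hf]
      simp only [howAfuel]
      rw [if_neg hLM]
      by_cases hLoc : location = L
      · rw [if_pos hLoc]
      · rw [if_neg hLoc]
        have h : cn > M := by tauto
        rw [if_pos h]
    · rw [if_neg hbase]
      rw [not_or] at hbase
      obtain ⟨hne, hcn'⟩ := hbase
      have hcn : cn ≤ M := by omega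
      have hloc : location ≤ L := by
        rcases hpre with h | h | h
        · exact absurd h hLM
        · exact h
        · omega
      have hw : cn + (((M - cn + 1).toNat : Nat) : Int) = M + 1 := by omega
      have hinit : ∀ j : Nat, j ≤ (M - cn + 1).toNat → ∀ fuel : Nat,
          muA L M (location + ((L - location).toNat : Int)) (cn + (j : Int)) < fuel →
          (List.replicate ((M - cn + 1).toNat + 1) (0 : Int)).getD j 0
            = howAfuel L M fuel (location + ((L - location).toNat : Int)) (cn + (j : Int)) := by
        intro j hj fuel hfuel
        have hLL : location + ((L - location).toNat : Int) = L := by omega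
        obtain ⟨f, rfl⟩ : ∃ f, fuel = f + 1 := ⟨fuel - 1, by omega⟩
        simp only [howAfuel]
        rw [if_neg hLM, if_pos hLL]
        simp
      have hmain := loopB_spec L M hLM location cn ((M - cn + 1).toNat) hw
        ((L - location).toNat) (List.replicate ((M - cn + 1).toNat + 1) 0)
        (by omega) (by simp) hinit
      obtain ⟨_, hspec⟩ := hmain
      have h0 := hspec 0 (by omega)
        ((L - location).natAbs + (M + 1 - cn).natAbs + 1)
        (by simp only [muA]; omega)
      simp only [Nat.cast_zero, add_zero] at h0
      exact h0.symm
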